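-- pv_equiv track=rewrite | github.com/Saurav-Paul/AI-virtual-assistant-python | tools/string_processing.py | wiki_string
-- ===== SOURCE A (Python) =====
-- def wiki_string(msg):
--     if 'wiki' not in msg and 'wikipedia' not in msg:
--         return msg
--     lt = list(msg.split())
--     msg = ""
--     ok = False
--     for word in lt:
--         if ok :
--             msg += word+' '
--         if word == 'wiki' or word =='wikipedia':
--             ok = True
--     return msg.rstrip()
-- ===== SOURCE B (Python) =====
-- def _after_token(words):
--     if not words:
--         return ''
--     head, tail = words[0], words[1:]
--     if head in ('wiki', 'wikipedia'):
--         return ' '.join(tail)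
--     return _after_token(tail)
--
--
-- def wiki_string(msg):
--     if 'wiki' not in msg and 'wikipedia' not in msg:
--         return msg
--     return _after_token(msg.split())
-- ===== Notes on version B (the rewrite author's own statement) =====
-- stated objective: simpler
-- what changed: Replaces A's ok-flag accumulation loop that rebuilds the tail word by word with a trailing space and rstrips it, by a recursive locate-the-first-'wiki'/'wikipedia'-token helper that returns ' '.join of the remaining words directly.
import Mathlib
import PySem

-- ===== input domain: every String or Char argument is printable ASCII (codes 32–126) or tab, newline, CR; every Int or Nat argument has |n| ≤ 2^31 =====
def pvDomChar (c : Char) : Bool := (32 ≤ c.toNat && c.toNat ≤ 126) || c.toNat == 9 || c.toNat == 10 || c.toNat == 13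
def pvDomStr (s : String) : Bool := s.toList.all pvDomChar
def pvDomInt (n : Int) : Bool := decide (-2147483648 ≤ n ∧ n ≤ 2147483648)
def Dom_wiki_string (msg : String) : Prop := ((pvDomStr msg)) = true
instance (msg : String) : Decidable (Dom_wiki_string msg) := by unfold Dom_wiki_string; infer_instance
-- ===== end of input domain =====

-- B replaces A's ok-flag accumulate-and-rstrip loop by a recursive locate-then-join decomposition (objective: simpler).

-- ===== PORT A =====
-- one loop step: append word+' ' if ok, then set ok on an exact 'wiki'/'wikipedia' token
def wikiStepA (p : List Char × Bool) (word : List Char) : List Char × Bool :=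
  (if p.2 then p.1 ++ word ++ [' '] else p.1,
   if word = "wiki".toList ∨ word = "wikipedia".toList then true else p.2)

def wiki_string (msg : String) : String :=
  if PySem.Str.isIn "wiki" msg = false ∧ PySem.Str.isIn "wikipedia" msg = false then msg
  else
    let lt := PySem.Chars.split₀ msg.toList
    let st := lt.foldl wikiStepA ([], false)
    String.ofList (PySem.Chars.rstrip st.1)

-- ===== PORT B =====
-- recursive helper: drop words up to and including the first exact token, join the rest
def afterToken : List (List Char) → List Char
  | [] => []
  | head :: tail =>
      if head = "wiki".toList ∨ head = "wikipedia".toList then PySem.Chars.join [' '] tail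
      else afterToken tail

def wiki_string_alt (msg : String) : String :=
  if PySem.Str.isIn "wiki" msg = false ∧ PySem.Str.isIn "wikipedia" msg = false then msg
  else String.ofList (afterToken (PySem.Chars.split₀ msg.toList))

-- ===== PRECONDITION & SPEC =====
def Spec_wiki_string (msg : String) (out : String) : Prop := out = wiki_string_alt msg
instance (msg : String) (out : String) : Decidable (Spec_wiki_string msg out) := by unfold Spec_wiki_string; infer_instance

-- ===== CLAIM (what is proved, stated in full; the proofs are below) =====
def Claim_equal_wiki_string : Prop := ∀ (msg : String), Dom_wiki_string msg → Spec_wiki_string msg (wiki_string msg)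

-- ===== LEMMAS AND PROOFS =====

-- a word produced by split₀ is nonempty and contains no whitespace character
theorem split₀_go_words (s cur : List Char) (acc : List (List Char))
    (hcur : ∀ c ∈ cur, PySem.Chars.isspace c = false)
    (hacc : ∀ w ∈ acc, w ≠ [] ∧ ∀ c ∈ w, PySem.Chars.isspace c = false) :
    ∀ w ∈ PySem.Chars.split₀.go s cur acc, w ≠ [] ∧ ∀ c ∈ w, PySem.Chars.isspace c = false := by
  induction s generalizing cur acc with
  | nil =>
    intro w hw
    simp only [PySem.Chars.split₀.go] at hw
    by_cases hc : cur.isEmpty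
    · simp [hc] at hw; exact hacc w (by simpa using hw)
    · simp [hc] at hw
      rcases hw with h | h
      · exact hacc w h
      · subst h
        refine ⟨by simpa using fun h => hc (by simp [h]), ?_⟩
        intro c hc'; exact hcur c (List.mem_reverse.mp hc')
  | cons c rest ih =>
    intro w hw
    simp only [PySem.Chars.split₀.go] at hw
    by_cases hs : PySem.Chars.isspace c
    · by_cases hc : cur.isEmpty
      · simp [hs, hc] at hw
        exact ih [] acc (by simp) hacc w hw
      · simp [hs, hc] at hw
        refine ih [] (cur.reverse :: acc) (by simp) ?_ w hw
        intro v hv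
        rcases List.mem_cons.mp hv with hv | hv
        · subst hv
          refine ⟨by simpa using fun h => hc (by simp [h]), ?_⟩
          intro d hd; exact hcur d (List.mem_reverse.mp hd)
        · exact hacc v hv
    · simp [hs] at hw
      refine ih (c :: cur) acc ?_ hacc w hw
      intro d hd
      rcases List.mem_cons.mp hd with hd | hd
      · subst hd; simpa using hs
      · exact hcur d hd

theorem split₀_words (s : List Char) :
    ∀ w ∈ PySem.Chars.split₀ s, w ≠ [] ∧ ∀ c ∈ w, PySem.Chars.isspace c = false := by
  simpa [PySem.Chars.split₀] using split₀_go_words s [] [] (by simp) (by simp)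

-- once ok is true, the fold appends every remaining word followed by ' '
theorem foldl_wikiStepA_true (ws : List (List Char)) (m : List Char) :
    ws.foldl wikiStepA (m, true) = (m ++ ws.flatMap (fun w => w ++ [' ']), true) := by
  induction ws generalizing m with
  | nil => simp
  | cons w ws ih =>
    simp only [List.foldl_cons, wikiStepA, if_pos]
    rw [show (if w = "wiki".toList ∨ w = "wikipedia".toList then true else true) = true by
      split <;> rfl]
    rw [ih]
    simp

-- a word with no whitespace has no whitespace to drop in front of its reverse
theorem dropWhile_reverse_of_no_space (w : List Char)
    (hs : ∀ c ∈ w, PySem.Chars.isspace c = false) :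
    List.dropWhile PySem.Chars.isspace w.reverse = w.reverse := by
  cases hrev : w.reverse with
  | nil => simp
  | cons a t =>
    rw [List.dropWhile_cons, if_neg]
    have : a ∈ w := List.mem_reverse.mp (hrev ▸ List.mem_cons_self)
    simp [hs a this]

-- rstripping the words-with-trailing-space accumulation yields the ' '-join
theorem rstrip_flatMap_eq_join (ws : List (List Char))
    (h : ∀ w ∈ ws, w ≠ [] ∧ ∀ c ∈ w, PySem.Chars.isspace c = false) :
    PySem.Chars.rstrip (ws.flatMap (fun w => w ++ [' '])) = PySem.Chars.join [' '] ws := by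
  induction ws with
  | nil => simp [PySem.Chars.rstrip, PySem.Chars.join, List.intercalate]
  | cons w ws ih =>
    cases ws with
    | nil =>
      obtain ⟨hne, hsp⟩ := h w (by simp)
      rw [PySem.Chars.join_singleton]
      rw [show List.flatMap (fun w => w ++ [' ']) [w] = w ++ [' '] from by simp]
      unfold PySem.Chars.rstrip
      rw [List.reverse_append]
      simp only [List.reverse_singleton, List.singleton_append, List.dropWhile_cons]
      rw [if_pos (by decide), dropWhile_reverse_of_no_space w hsp]
      simp
    | cons w' ws' =>
      have hrest := ih (fun v hv => h v (List.mem_cons_of_mem _ hv))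
      have hjoin_ne : PySem.Chars.join [' '] (w' :: ws') ≠ [] := by
        obtain ⟨hne', _⟩ := h w' (by simp)
        cases ws' with
        | nil => rw [PySem.Chars.join_singleton]; exact hne'
        | cons a b =>
          rw [PySem.Chars.join_cons_cons]
          intro hcontra
          exact hne' (List.append_eq_nil_iff.mp ((List.append_assoc _ _ _) ▸ hcontra)).1
      rw [PySem.Chars.join_cons_cons]
      rw [show List.flatMap (fun w => w ++ [' ']) (w :: w' :: ws') =
        (w ++ [' ']) ++ List.flatMap (fun w => w ++ [' ']) (w' :: ws') from by simp]
      unfold PySem.Chars.rstrip at hrest ⊢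
      rw [List.reverse_append, List.dropWhile_append]
      have hne : ¬ (List.dropWhile PySem.Chars.isspace
          ((w' :: ws').flatMap (fun w => w ++ [' '])).reverse).isEmpty := by
        intro hemp
        apply hjoin_ne
        rw [← hrest, List.isEmpty_iff.mp hemp]
        simp
      rw [if_neg hne, List.reverse_append, hrest]
      simp

-- main loop correspondence: A's fold-then-rstrip equals B's locate-then-join
theorem fold_eq_afterToken (ws : List (List Char))
    (h : ∀ w ∈ ws, w ≠ [] ∧ ∀ c ∈ w, PySem.Chars.isspace c = false) :
    PySem.Chars.rstrip (ws.foldl wikiStepA ([], false)).1 = afterToken ws := by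
  induction ws with
  | nil => simp [afterToken, PySem.Chars.rstrip]
  | cons w ws ih =>
    simp only [List.foldl_cons, afterToken]
    by_cases htok : w = "wiki".toList ∨ w = "wikipedia".toList
    · rw [show wikiStepA ([], false) w = ([], true) from by
        simp only [wikiStepA]; rw [if_pos htok]; simp]
      rw [foldl_wikiStepA_true, if_pos htok]
      exact rstrip_flatMap_eq_join ws (fun v hv => h v (List.mem_cons_of_mem _ hv))
    · rw [show wikiStepA ([], false) w = ([], false) from by
        simp only [wikiStepA]; rw [if_neg htok]; simp]
      rw [if_neg htok]
      exact ih (fun v hv => h v (List.mem_cons_of_mem _ hv))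

-- ===== VERDICT (by name: the statement is the Claim_ definition above) =====
theorem wiki_string_spec : Claim_equal_wiki_string := by
  intro msg _
  unfold Spec_wiki_string wiki_string wiki_string_alt
  by_cases hg : PySem.Str.isIn "wiki" msg = false ∧ PySem.Str.isIn "wikipedia" msg = false
  · rw [if_pos hg, if_pos hg]
  · rw [if_neg hg, if_neg hg]
    exact congrArg String.ofList (fold_eq_afterToken _ (split₀_words msg.toList))
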